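-- pv_equiv track=rewrite | github.com/discosultan/juno | juno/utils.py | generate_missing_spans
-- ===== SOURCE A (Python) =====
-- from typing import (Any, Awaitable, Callable, Dict, Generic, Iterable, Iterator, List, Optional,
--                     Set, Tuple, Type, TypeVar, Union, cast, get_type_hints)
--
-- def generate_missing_spans(start: int, end: int,
--                            existing_spans: Iterable[Tuple[int, int]]) -> Iterable[Tuple[int, int]]:
--     # Initially assume entire span missing.
--     missing_start, missing_end = start, end
--
--     # Spans are ordered by start_date. Spans do not overlap with each other.
--     for existing_start, existing_end in existing_spans:
--         if existing_start > missing_start: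
--             yield missing_start, existing_start
--         missing_start = existing_end
--
--     if missing_start < missing_end:
--         yield missing_start, missing_end
-- ===== SOURCE B (Python) =====
-- def generate_missing_spans(start, end, existing_spans):
--     # Boundary-pairing: complement intervals are (left_i, right_i) with
--     # lefts = [start] + ends of spans, rights = starts of spans + [end].
--     spans = list(existing_spans)
--     lefts = [start] + [e for _, e in spans]
--     rights = [s for s, _ in spans] + [end]
--     for l, r in zip(lefts, rights):
--         if l < r:
--             yield l, r
-- ===== Notes on version B (the rewrite author's own statement) =====
-- stated objective: alternative
-- what changed: Replaces the running missing_start accumulator with a data-level decomposition: build the shifted boundary lists [start]+span-ends and span-starts+[end] once, then emit every pair (l, r) with l < r from their zip.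
import Mathlib
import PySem

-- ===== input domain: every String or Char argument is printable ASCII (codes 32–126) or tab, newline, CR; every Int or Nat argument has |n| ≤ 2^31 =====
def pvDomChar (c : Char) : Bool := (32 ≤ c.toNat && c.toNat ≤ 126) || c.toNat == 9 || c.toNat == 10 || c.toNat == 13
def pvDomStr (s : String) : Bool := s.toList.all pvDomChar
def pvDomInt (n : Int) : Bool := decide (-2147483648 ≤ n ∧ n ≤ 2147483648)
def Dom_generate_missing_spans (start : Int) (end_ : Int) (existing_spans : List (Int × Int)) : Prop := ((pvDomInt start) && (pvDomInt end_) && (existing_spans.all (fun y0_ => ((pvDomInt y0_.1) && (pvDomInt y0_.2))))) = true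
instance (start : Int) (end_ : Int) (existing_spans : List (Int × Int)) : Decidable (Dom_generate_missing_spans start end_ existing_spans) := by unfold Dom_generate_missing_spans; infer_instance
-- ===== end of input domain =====

-- B recomputes the gap list by zipping precomputed shifted boundary lists instead of A's running missing_start fold (alternative decomposition, same cost).


-- ===== PORT A =====
-- A: fold keeping (missing_start, yielded-so-far), then final tail gap.
def generate_missing_spans (start : Int) (end_ : Int) (existing_spans : List (Int × Int)) : List (Int × Int) :=
  let p := existing_spans.foldl
    (fun (st : Int × List (Int × Int)) sp =>
      let acc := if sp.1 > st.1 then st.2 ++ [(st.1, sp.1)] else st.2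
      (sp.2, acc))
    (start, [])
  if p.1 < end_ then p.2 ++ [(p.1, end_)] else p.2

-- ===== PORT B =====
-- B: pair the shifted boundary lists and keep the nonempty gaps.
def generate_missing_spans_alt (start : Int) (end_ : Int) (existing_spans : List (Int × Int)) : List (Int × Int) :=
  let lefts := start :: existing_spans.map Prod.snd
  let rights := existing_spans.map Prod.fst ++ [end_]
  (lefts.zip rights).filter (fun p => p.1 < p.2)

-- ===== PRECONDITION & SPEC =====
def Spec_generate_missing_spans (start : Int) (end_ : Int) (existing_spans : List (Int × Int)) (out : List (Int × Int)) : Prop := out = generate_missing_spans_alt start end_ existing_spans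
instance (start : Int) (end_ : Int) (existing_spans : List (Int × Int)) (out : List (Int × Int)) : Decidable (Spec_generate_missing_spans start end_ existing_spans out) := by unfold Spec_generate_missing_spans; infer_instance

-- ===== CLAIM (what is proved, stated in full; the proofs are below) =====
def Claim_equal_generate_missing_spans : Prop := ∀ (start : Int) (end_ : Int) (existing_spans : List (Int × Int)), Dom_generate_missing_spans start end_ existing_spans → Spec_generate_missing_spans start end_ existing_spans (generate_missing_spans start end_ existing_spans)

-- ===== LEMMAS AND PROOFS =====

lemma gms_key : ∀ (spans : List (Int × Int)) (ms e : Int) (acc : List (Int × Int)),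
    (let p := spans.foldl
        (fun (st : Int × List (Int × Int)) sp =>
          let a := if sp.1 > st.1 then st.2 ++ [(st.1, sp.1)] else st.2
          (sp.2, a))
        (ms, acc)
     if p.1 < e then p.2 ++ [(p.1, e)] else p.2)
    = acc ++ ((ms :: spans.map Prod.snd).zip (spans.map Prod.fst ++ [e])).filter
        (fun p => p.1 < p.2)
  | [], ms, e, acc => by
    simp [List.filter]
    split_ifs with h
    · simp [h]
    · simp [h]
  | (a, b) :: rest, ms, e, acc => by
    have ih := gms_key rest b e (acc ++ if a > ms then [(ms, a)] else [])
    simp only [List.foldl_cons, List.map_cons, List.cons_append, List.zip_cons_cons,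
      List.filter_cons] at *
    by_cases h : ms < a
    · simp only [h, gt_iff_lt, decide_true] at *
      simpa [List.append_assoc] using ih
    · simp only [h, gt_iff_lt, decide_false] at *
      simpa using ih

-- ===== VERDICT (by name: the statement is the Claim_ definition above) =====
theorem generate_missing_spans_spec : Claim_equal_generate_missing_spans := by
  intro s e spans _
  unfold Spec_generate_missing_spans generate_missing_spans generate_missing_spans_alt
  simpa using gms_key spans s e []
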